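-- pv_equiv track=rewrite | github.com/al-osokin/rueo_global | backend/app/parsing/parser_v3/normalization.py | _generate_lemmas_from_raw
-- ===== SOURCE A (Python) =====
-- from typing import Any, Dict, Iterable, List, Optional, Tuple
--
-- def _generate_lemmas_from_raw(raw: str, parent_bases: Optional[List[str]]) -> List[str]:
--     pattern = raw.replace("|", "")
--     pattern = pattern.replace("/", "")
--     expansions = _expand_pattern(pattern)
--     bases = parent_bases or [""]
--     results: List[str] = []
--     for base in bases:
--         for item in expansions:
--             if "~" in item and not base:
--                 continue
--             replaced = item.replace("~", base)
--             if replaced: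
--                 results.append(replaced)
--     return _unique_preserve_order(results)
--
-- def _expand_pattern(pattern: str) -> List[str]:
--     cleaned = pattern
--
--     def recurse(index: int) -> Tuple[List[str], int]:
--         results = [""]
--         i = index
--         while i < len(cleaned):
--             char = cleaned[i]
--             if char == '(':
--                 inner, new_index = recurse(i + 1)
--                 updated: List[str] = []
--                 for current in results:
--                     updated.append(current)
--                     for addition in inner:
--                         updated.append(current + addition)
--                 results = updated
--                 i = new_index
--             elif char == ')':
--                 return results, i + 1
--             else:
--                 j = i
--                 while j < len(cleaned) and cleaned[j] not in '()':
--                     j += 1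
--                 literal = cleaned[i:j]
--                 results = [current + literal for current in results]
--                 i = j
--                 continue
--         return results, i
--
--     expanded, _ = recurse(0)
--     return _unique_preserve_order([item for item in expanded if item])
--
-- def _unique_preserve_order(items: Iterable[str]) -> List[str]:
--     seen: set = set()
--     result: List[str] = []
--     for item in items:
--         if item in seen:
--             continue
--         seen.add(item)
--         result.append(item)
--     return result
-- ===== SOURCE B (Python) =====
-- from typing import List, Optional
--
--
-- def _generate_lemmas_from_raw(raw: str, parent_bases: Optional[List[str]]) -> List[str]:
--     # Iterative expansion with an explicit stack instead of recursion;
--     # comprehensions + dict.fromkeys instead of accumulator loops with a seen-set.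
--     cleaned = [ch for ch in raw if ch != '|' and ch != '/']
--     results = [""]
--     stack: List[List[str]] = []
--     for ch in cleaned:
--         if ch == '(':
--             stack.append(results)
--             results = [""]
--         elif ch == ')':
--             if not stack:
--                 break  # stray ')' at top level: stop scanning
--             results = [p + s for p in stack.pop() for s in [""] + results]
--         else:
--             results = [r + ch for r in results]
--     while stack:  # unclosed '(' groups close at end of input
--         results = [p + s for p in stack.pop() for s in [""] + results]
--     expansions = list(dict.fromkeys(e for e in results if e))
--     bases = parent_bases or [""]
--     combined = [item.replace("~", base)
--                 for base in bases
--                 for item in expansions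
--                 if not (base == "" and "~" in item)]
--     return list(dict.fromkeys(c for c in combined if c))
-- ===== Notes on version B (the rewrite author's own statement) =====
-- stated objective: alternative
-- what changed: The recursive bracket expansion is replaced by a single left-to-right scan with an explicit stack of partial-result lists, the accumulator loops by comprehensions, and the seen-set dedup by dict.fromkeys.
import Mathlib
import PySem

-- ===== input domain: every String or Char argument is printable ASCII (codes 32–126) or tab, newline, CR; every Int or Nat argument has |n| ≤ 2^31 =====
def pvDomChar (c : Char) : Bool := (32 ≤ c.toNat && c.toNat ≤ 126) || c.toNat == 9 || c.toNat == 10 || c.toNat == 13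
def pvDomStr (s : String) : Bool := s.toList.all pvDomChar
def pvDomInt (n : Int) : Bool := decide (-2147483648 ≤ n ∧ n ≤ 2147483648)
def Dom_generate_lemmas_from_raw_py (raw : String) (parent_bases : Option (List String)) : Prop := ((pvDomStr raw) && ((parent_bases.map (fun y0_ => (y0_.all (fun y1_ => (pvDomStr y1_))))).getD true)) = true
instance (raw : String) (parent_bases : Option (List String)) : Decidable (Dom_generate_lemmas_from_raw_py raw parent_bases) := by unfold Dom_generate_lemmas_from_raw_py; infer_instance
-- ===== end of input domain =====

-- B replaces A's recursive bracket expansion by an explicit-stack left-to-right scan and the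
-- accumulator loops / seen-set dedup by comprehensions + dict.fromkeys (objective: alternative, same cost).

-- ===== PORT A =====
-- _unique_preserve_order: seen-set + result list (over List Char; strings are built at the end).
def pvUniqA (items : List (List Char)) : List (List Char) :=
  (items.foldl (fun st item =>
      if PySem.Set.contains st.1 item then st
      else (PySem.Set.add st.1 item, st.2 ++ [item]))
    ((PySem.Set.empty : PySem.Set (List Char)), ([] : List (List Char)))).2

-- _expand_pattern's recurse: structural port; the (results, new_index) pair is rendered as
-- (results, remaining suffix), the suffix carrying its length bound for termination.
-- The j-scan for a literal run is the corresponding takeWhile/dropWhile split (exact).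
def pvRecA : (l : List Char) → List (List Char) → List (List Char) × {r : List Char // r.length ≤ l.length}
  | [], results => (results, ⟨[], Nat.le_refl 0⟩)
  | c :: rest, results =>
    if hpar : c = '(' then
      let ir := pvRecA rest [[]]
      let updated := results.flatMap (fun cur => cur :: ir.1.map (fun a => cur ++ a))
      let rr := pvRecA ir.2.val updated
      (rr.1, ⟨rr.2.val, le_trans rr.2.property (le_trans ir.2.property (Nat.le_succ _))⟩)
    else if hclose : c = ')' then
      (results, ⟨rest, Nat.le_succ _⟩)
    else
      let lit := List.takeWhile (fun ch => !(ch == '(' || ch == ')')) (c :: rest)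
      let rest' := List.dropWhile (fun ch => !(ch == '(' || ch == ')')) (c :: rest)
      let rr := pvRecA rest' (results.map (fun cur => cur ++ lit))
      (rr.1, ⟨rr.2.val, le_trans rr.2.property (List.length_dropWhile_le _ _)⟩)
termination_by l => l.length
decreasing_by
  · simp
  · exact Nat.lt_succ_of_le ir.2.property
  · have h : List.dropWhile (fun ch => !(ch == '(' || ch == ')')) (c :: rest)
        = List.dropWhile (fun ch => !(ch == '(' || ch == ')')) rest := by
      simp [hpar, hclose]
    simp only [h]
    exact Nat.lt_succ_of_le (List.length_dropWhile_le _ _)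

def pvExpandA (pattern : List Char) : List (List Char) :=
  pvUniqA (((pvRecA pattern [[]]).1).filter (fun item => !item.isEmpty))

def generate_lemmas_from_raw_py (raw : String) (parent_bases : Option (List String)) : List String :=
  let pattern := PySem.Chars.replace raw.toList ['|'] []
  let pattern2 := PySem.Chars.replace pattern ['/'] []
  let expansions := pvExpandA pattern2
  let bases : List (List Char) := match parent_bases with
    | none => [[]]
    | some l => if l.isEmpty then [[]] else l.map String.toList
  let results := bases.foldl (fun acc base =>
      expansions.foldl (fun acc item =>
        if PySem.Chars.isIn ['~'] item && base.isEmpty then acc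
        else
          let replaced := PySem.Chars.replace item ['~'] base
          if !replaced.isEmpty then acc ++ [replaced] else acc) acc) []
  (pvUniqA results).map String.ofList

-- ===== PORT B =====
-- [p + s for p in parent for s in [""] + cur]
def pvCombine (parent cur : List (List Char)) : List (List Char) :=
  parent.flatMap (fun p => ([] :: cur).map (fun s => p ++ s))

-- the for-loop over cleaned with the explicit stack, then the closing while-loop
def pvLoopB : List Char → List (List Char) → List (List (List Char)) → List (List Char)
  | [], cur, stack => stack.foldl (fun cur p => pvCombine p cur) cur
  | c :: rest, cur, stack =>
    if c = '(' then pvLoopB rest [[]] (cur :: stack)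
    else if c = ')' then
      match stack with
      | [] => cur
      | p :: st => pvLoopB rest (pvCombine p cur) st
    else pvLoopB rest (cur.map (fun r => r ++ [c])) stack

def generate_lemmas_from_raw_py_alt (raw : String) (parent_bases : Option (List String)) : List String :=
  let cleaned := raw.toList.filter (fun ch => ch != '|' && ch != '/')
  let results := pvLoopB cleaned [[]] []
  let expansions := PySem.List.dedup (results.filter (fun e => !e.isEmpty))
  let bases : List (List Char) := match parent_bases with
    | none => [[]]
    | some l => if l.isEmpty then [[]] else l.map String.toList
  let combined := bases.flatMap (fun base =>
      (expansions.filter (fun item => !(base.isEmpty && PySem.Chars.isIn ['~'] item))).map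
        (fun item => PySem.Chars.replace item ['~'] base))
  (PySem.List.dedup (combined.filter (fun c => !c.isEmpty))).map String.ofList

-- ===== PRECONDITION & SPEC =====
def Spec_generate_lemmas_from_raw_py (raw : String) (parent_bases : Option (List String)) (out : List String) : Prop := out = generate_lemmas_from_raw_py_alt raw parent_bases
instance (raw : String) (parent_bases : Option (List String)) (out : List String) : Decidable (Spec_generate_lemmas_from_raw_py raw parent_bases out) := by unfold Spec_generate_lemmas_from_raw_py; infer_instance

-- ===== CLAIM (what is proved, stated in full; the proofs are below) =====
def Claim_equal_generate_lemmas_from_raw_py : Prop := ∀ (raw : String) (parent_bases : Option (List String)), Dom_generate_lemmas_from_raw_py raw parent_bases → Spec_generate_lemmas_from_raw_py raw parent_bases (generate_lemmas_from_raw_py raw parent_bases)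

-- ===== LEMMAS AND PROOFS =====

theorem pv_combine_eq (parent inner : List (List Char)) :
    pvCombine parent inner = parent.flatMap (fun cur => cur :: inner.map (fun a => cur ++ a)) := by
  simp [pvCombine]

theorem pv_go_del (c0 : Char) : ∀ (fuel : Nat) (l acc : List Char), l.length ≤ fuel →
    PySem.Chars.replace.go [c0] [] fuel l acc = acc.reverse ++ l.filter (fun ch => ch != c0) := by
  intro fuel
  induction fuel with
  | zero => intro l acc h; interval_cases hl : l.length; · simp_all [PySem.Chars.replace.go, List.length_eq_zero_iff.mp hl]
  | succ n ih =>
    intro l acc h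
    match l with
    | [] => simp [PySem.Chars.replace.go]
    | c :: t =>
      by_cases hc : c0 = c
      · subst hc
        simp only [PySem.Chars.replace.go, List.isPrefixOf, beq_self_eq_true, Bool.true_and]
        rw [ih _ _ (by simpa using h)]
        simp
      · have ht : t.length ≤ n := by simp at h; omega
        simp only [PySem.Chars.replace.go, List.isPrefixOf, beq_eq_false_iff_ne.mpr hc, Bool.false_and]
        rw [if_neg (by simp), ih t (c :: acc) ht]
        simp [Ne.symm hc]

theorem pv_replace_del (s : List Char) (c0 : Char) :
    PySem.Chars.replace s [c0] [] = s.filter (fun ch => ch != c0) := by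
  have := pv_go_del c0 s.length s [] (Nat.le_refl _)
  simpa [PySem.Chars.replace] using this

theorem pv_uniq_aux (items : List (List Char)) : ∀ (s : List (List Char)),
    (items.foldl (fun st item =>
      if PySem.Set.contains st.1 item then st
      else (PySem.Set.add st.1 item, st.2 ++ [item])) (s, s)).2
    = items.foldl PySem.Set.add s := by
  induction items with
  | nil => intro s; rfl
  | cons x xs ih =>
    intro s
    by_cases hx : PySem.Set.contains s x
    · simp only [List.foldl_cons, if_pos hx, PySem.Set.add, hx, if_true]
      exact ih s
    · simp only [List.foldl_cons, if_neg hx, PySem.Set.add, hx, if_false]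
      exact ih (s ++ [x])

theorem pv_uniq_eq_dedup (items : List (List Char)) :
    pvUniqA items = PySem.List.dedup items := by
  unfold pvUniqA
  simpa [PySem.List.dedup, PySem.Set.ofList, PySem.Set.empty] using pv_uniq_aux items []

def pvRecA' (l : List Char) (res : List (List Char)) : List (List Char) × List Char :=
  ((pvRecA l res).1, (pvRecA l res).2.val)

theorem pvRecA_fst (l : List Char) (res : List (List Char)) :
    (pvRecA l res).1 = (pvRecA' l res).1 := rfl
theorem pvRecA_snd (l : List Char) (res : List (List Char)) :
    ((pvRecA l res).2 : List Char) = (pvRecA' l res).2 := rfl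

theorem pvRecA'_len (l : List Char) (res : List (List Char)) :
    (pvRecA' l res).2.length ≤ l.length := (pvRecA l res).2.property

theorem pvRecA'_nil (res : List (List Char)) : pvRecA' [] res = (res, []) := by
  simp only [pvRecA']
  rw [pvRecA]

theorem pvRecA'_par (rest : List Char) (res : List (List Char)) :
    pvRecA' ('(' :: rest) res
      = pvRecA' (pvRecA' rest [[]]).2
          (res.flatMap (fun cur => cur :: (pvRecA' rest [[]]).1.map (fun a => cur ++ a))) := by
  simp only [pvRecA']
  rw [pvRecA]
  simp [pvRecA_fst, pvRecA_snd]

theorem pvRecA'_close (rest : List Char) (res : List (List Char)) :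
    pvRecA' (')' :: rest) res = (res, rest) := by
  simp only [pvRecA']
  rw [pvRecA]
  simp

theorem pvRecA'_lit (c : Char) (rest : List Char) (res : List (List Char))
    (h1 : c ≠ '(') (h2 : c ≠ ')') :
    pvRecA' (c :: rest) res = pvRecA' rest (res.map (fun r => r ++ [c])) := by
  have b1 : (c == '(') = false := beq_eq_false_iff_ne.mpr h1
  have b2 : (c == ')') = false := beq_eq_false_iff_ne.mpr h2
  have hd : List.dropWhile (fun ch => !(ch == '(' || ch == ')')) (c :: rest)
      = List.dropWhile (fun ch => !(ch == '(' || ch == ')')) rest := by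
    rw [List.dropWhile_cons]; simp [b1, b2]
  have ht : List.takeWhile (fun ch => !(ch == '(' || ch == ')')) (c :: rest)
      = c :: List.takeWhile (fun ch => !(ch == '(' || ch == ')')) rest := by
    rw [List.takeWhile_cons]; simp [b1, b2]
  have main : pvRecA' (c :: rest) res
      = pvRecA' (List.dropWhile (fun ch => !(ch == '(' || ch == ')')) rest)
          (res.map (fun r => r ++ c :: List.takeWhile (fun ch => !(ch == '(' || ch == ')')) rest)) := by
    simp only [pvRecA']
    rw [pvRecA]
    simp only [dif_neg h1, dif_neg h2, pvRecA_fst, pvRecA_snd, hd, ht]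
  rw [main]
  match rest with
  | [] => simp [pvRecA'_nil]
  | c' :: t =>
    by_cases hp : c' = '('
    · subst hp; simp [List.takeWhile_cons, List.dropWhile_cons]
    · by_cases hq : c' = ')'
      · subst hq; simp [List.takeWhile_cons, List.dropWhile_cons]
      · have b3 : (c' == '(') = false := beq_eq_false_iff_ne.mpr hp
        have b4 : (c' == ')') = false := beq_eq_false_iff_ne.mpr hq
        have hd' : List.dropWhile (fun ch => !(ch == '(' || ch == ')')) (c' :: t)
            = List.dropWhile (fun ch => !(ch == '(' || ch == ')')) t := by
          rw [List.dropWhile_cons]; simp [b3, b4]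
        have ht' : List.takeWhile (fun ch => !(ch == '(' || ch == ')')) (c' :: t)
            = c' :: List.takeWhile (fun ch => !(ch == '(' || ch == ')')) t := by
          rw [List.takeWhile_cons]; simp [b3, b4]
        have main' : pvRecA' (c' :: t) (res.map (fun r => r ++ [c]))
            = pvRecA' (List.dropWhile (fun ch => !(ch == '(' || ch == ')')) t)
                ((res.map (fun r => r ++ [c])).map
                  (fun r => r ++ c' :: List.takeWhile (fun ch => !(ch == '(' || ch == ')')) t)) := by
          simp only [pvRecA']
          rw [pvRecA]
          simp only [dif_neg hp, dif_neg hq, pvRecA_fst, pvRecA_snd, hd', ht']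
        rw [main']
        simp only [hd', ht']
        simp [Function.comp_def, List.append_assoc]

theorem pv_loopB_stack : ∀ (n : Nat) (l : List Char), l.length ≤ n →
    ∀ (cur p : List (List Char)) (st : List (List (List Char))),
    pvLoopB l cur (p :: st)
      = pvLoopB (pvRecA' l cur).2 (pvCombine p (pvRecA' l cur).1) st := by
  intro n
  induction n with
  | zero =>
    intro l h cur p st
    rw [List.length_eq_zero_iff.mp (Nat.le_zero.mp h)]
    simp [pvLoopB, pvRecA'_nil]
  | succ n ih =>
    intro l h cur p st
    match l with
    | [] => simp [pvLoopB, pvRecA'_nil]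
    | c :: rest =>
      have hr : rest.length ≤ n := by simpa using h
      by_cases h1 : c = '('
      · subst h1
        rw [show pvLoopB ('(' :: rest) cur (p :: st) = pvLoopB rest [[]] (cur :: p :: st) by simp [pvLoopB]]
        rw [ih rest hr [[]] cur (p :: st)]
        rw [ih _ (le_trans (pvRecA'_len rest [[]]) hr) _ p st]
        rw [pvRecA'_par]
        rw [pv_combine_eq]
      · by_cases h2 : c = ')'
        · subst h2
          rw [show pvLoopB (')' :: rest) cur (p :: st) = pvLoopB rest (pvCombine p cur) st by
            simp [pvLoopB]]
          rw [pvRecA'_close]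
        · rw [show pvLoopB (c :: rest) cur (p :: st)
              = pvLoopB rest (cur.map (fun r => r ++ [c])) (p :: st) by simp [pvLoopB, h1, h2]]
          rw [ih rest hr _ p st, pvRecA'_lit c rest cur h1 h2]

theorem pv_loopB_top : ∀ (n : Nat) (l : List Char), l.length ≤ n →
    ∀ (cur : List (List Char)),
    pvLoopB l cur [] = (pvRecA' l cur).1 := by
  intro n
  induction n with
  | zero =>
    intro l h cur
    rw [List.length_eq_zero_iff.mp (Nat.le_zero.mp h)]
    simp [pvLoopB, pvRecA'_nil]
  | succ n ih =>
    intro l h cur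
    match l with
    | [] => simp [pvLoopB, pvRecA'_nil]
    | c :: rest =>
      have hr : rest.length ≤ n := by simpa using h
      by_cases h1 : c = '('
      · subst h1
        rw [show pvLoopB ('(' :: rest) cur [] = pvLoopB rest [[]] [cur] by simp [pvLoopB]]
        rw [pv_loopB_stack n rest hr [[]] cur []]
        rw [ih _ (le_trans (pvRecA'_len rest [[]]) hr)]
        rw [pvRecA'_par, pv_combine_eq]
      · by_cases h2 : c = ')'
        · subst h2
          rw [show pvLoopB (')' :: rest) cur [] = cur by simp [pvLoopB]]
          rw [pvRecA'_close]
        · rw [show pvLoopB (c :: rest) cur []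
              = pvLoopB rest (cur.map (fun r => r ++ [c])) [] by simp [pvLoopB, h1, h2]]
          rw [ih rest hr, pvRecA'_lit c rest cur h1 h2]

theorem pv_inner_fold (c1 : List Char → Bool) (f : List Char → List Char) :
    ∀ (exps : List (List Char)) (acc : List (List Char)),
    exps.foldl (fun acc item =>
        if c1 item then acc
        else if !(f item).isEmpty then acc ++ [f item] else acc) acc
      = acc ++ ((exps.filter (fun i => !c1 i)).map f).filter (fun r => !r.isEmpty) := by
  intro exps
  induction exps with
  | nil => intro acc; simp
  | cons x xs ih =>
    intro acc
    rw [List.foldl_cons, ih]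
    by_cases hx : c1 x
    · simp [hx]
    · by_cases he : (f x).isEmpty
      · simp [hx, he, List.isEmpty_iff.mp he]
      · simp [hx, he]

theorem pv_final (raw : String) (parent_bases : Option (List String)) :
    generate_lemmas_from_raw_py raw parent_bases
      = generate_lemmas_from_raw_py_alt raw parent_bases := by
  unfold generate_lemmas_from_raw_py generate_lemmas_from_raw_py_alt
  simp only [pvExpandA]
  have hclean : PySem.Chars.replace (PySem.Chars.replace raw.toList ['|'] []) ['/'] []
      = raw.toList.filter (fun ch => ch != '|' && ch != '/') := by
    rw [pv_replace_del, pv_replace_del, List.filter_filter]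
    exact List.filter_congr fun x _ => by simp [Bool.and_comm]
  rw [hclean]
  set X := raw.toList.filter (fun ch => ch != '|' && ch != '/') with hX
  have hloop : pvLoopB X [[]] [] = (pvRecA X [[]]).1 := by
    rw [pv_loopB_top X.length X (Nat.le_refl _) [[]]]; rfl
  rw [hloop, pv_uniq_eq_dedup]
  set expansions := PySem.List.dedup (((pvRecA X [[]]).1).filter (fun item => !item.isEmpty))
    with hE
  set bases : List (List Char) := (match parent_bases with
    | none => [[]]
    | some l => if l.isEmpty then [[]] else l.map String.toList) with hB
  congr 1
  rw [pv_uniq_eq_dedup]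
  congr 1
  simp only [pv_inner_fold]
  rw [PySem.List.foldl_append_eq_flatMap]
  rw [List.filter_flatMap]
  simp [Bool.and_comm, hE, PySem.List.dedup]

-- ===== VERDICT (by name: the statement is the Claim_ definition above) =====
theorem generate_lemmas_from_raw_py_spec : Claim_equal_generate_lemmas_from_raw_py := by
  intro raw parent_bases _
  unfold Spec_generate_lemmas_from_raw_py
  exact pv_final raw parent_bases
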